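-- pv_equiv track=rewrite | github.com/TheKetan2/Programming-Practice | edabitPython/little_big.py | little_big
-- ===== SOURCE A (Python) =====
-- def little_big(n):
-- 	one = 5
-- 	two = 100
-- 	sol = [5,100]
-- 	for i in range (0, n+1):
-- 		one +=1
-- 		two *=2
-- 		sol.append(one)
-- 		sol.append(two)
-- 	return sol[n-1]
-- ===== SOURCE B (Python) =====
-- def little_big(n):
--     # Closed form by parity of n: the list A builds is [5,100,6,200,7,400,...],
--     # i.e. element at 1-based position n is linear for odd n, a power of two for even n.
--     if n % 2:
--         return 5 + (n - 1) // 2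
--     return 100 << (n // 2 - 1)
-- ===== Notes on version B (the rewrite author's own statement) =====
-- stated objective: faster
-- what changed: Replaces the O(n) loop that builds a 2n-element list with an O(1) closed-form by index parity (linear value for odd n, a single shift for even n).
-- outside the precondition, e.g. on little_big(-1): A returns 5, B returns 4; on little_big(0): A returns 200, B raises ValueError
import Mathlib
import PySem

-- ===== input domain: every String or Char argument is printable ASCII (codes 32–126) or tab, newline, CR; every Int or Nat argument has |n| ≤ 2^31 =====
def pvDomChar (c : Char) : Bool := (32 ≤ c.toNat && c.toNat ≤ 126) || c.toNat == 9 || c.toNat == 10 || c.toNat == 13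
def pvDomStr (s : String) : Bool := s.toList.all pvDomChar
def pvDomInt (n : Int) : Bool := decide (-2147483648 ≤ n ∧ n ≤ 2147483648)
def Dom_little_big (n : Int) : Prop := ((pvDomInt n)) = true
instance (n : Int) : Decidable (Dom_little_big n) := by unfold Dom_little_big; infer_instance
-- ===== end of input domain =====

-- B replaces A's O(n) list-building loop with an O(1) closed form by index parity (faster, asymptotic).

-- ===== PORT A =====
-- Literal port: fold over range(0, n+1) carrying (one, two, sol), then sol[n-1].
-- sol[n-1] is pyGetD with default 0; Pre_ guarantees the index is in range (Python would raise otherwise).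
def little_big (n : Int) : Int :=
  let st := (PySem.List.pyRange 0 (n + 1) 1).foldl
    (fun (st : Int × Int × List Int) _ =>
      let one := st.1 + 1
      let two := st.2.1 * 2
      (one, two, (st.2.2 ++ [one]) ++ [two]))
    (5, 100, [5, 100])
  PySem.List.pyGetD st.2.2 (n - 1) 0

-- ===== PORT B =====
-- Literal port of Source B; '100 << (n//2 - 1)' is 100 * 2^(n//2 - 1) (Pre_ keeps the shift amount ≥ 0,
-- where Python's shift returns exactly this).
def little_big_alt (n : Int) : Int :=
  if PySem.Int.mod n 2 ≠ 0 then 5 + PySem.Int.floordiv (n - 1) 2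
  else 100 * 2 ^ (PySem.Int.floordiv n 2 - 1).toNat

-- ===== PRECONDITION & SPEC =====
-- Pre_ excludes n ≤ 0: for n ≤ -2 A raises IndexError; for n ∈ {-1, 0} A's values (5, 200) come from
-- Python's negative-index wraparound into the freshly built list — an accidental corner no caller of
-- "the nth element of the sequence" would specify — and B's formula raises (n = 0) or gives its own
-- accidental extension (n = -1) there.
def Pre_little_big (n : Int) : Prop := 1 ≤ n
instance (n : Int) : Decidable (Pre_little_big n) := by unfold Pre_little_big; infer_instance
def pvWitness_little_big : Int := (7)
def Spec_little_big (n : Int) (out : Int) : Prop := out = little_big_alt n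
instance (n : Int) (out : Int) : Decidable (Spec_little_big n out) := by unfold Spec_little_big; infer_instance

-- ===== CLAIM (what is proved, stated in full; the proofs are below) =====
def Claim_equal_little_big : Prop := ∀ (n : Int), Dom_little_big n → Pre_little_big n → Spec_little_big n (little_big n)

-- ===== LEMMAS AND PROOFS =====

-- the elements A's loop appends, starting from counters (one, two), over k iterations
def lbBuild (one two : Int) : Nat → List Int
  | 0 => []
  | k + 1 => [one + 1, two * 2] ++ lbBuild (one + 1) (two * 2) k

theorem lbBuild_length (one two : Int) (k : Nat) : (lbBuild one two k).length = 2 * k := by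
  induction k generalizing one two with
  | zero => rfl
  | succ k ih => simp [lbBuild, ih]; omega

theorem lb_fold (l : List Int) (one two : Int) (sol : List Int) :
    l.foldl (fun (st : Int × Int × List Int) _ =>
        let o := st.1 + 1
        let t := st.2.1 * 2
        (o, t, (st.2.2 ++ [o]) ++ [t])) (one, two, sol)
      = (one + l.length, two * 2 ^ l.length, sol ++ lbBuild one two l.length) := by
  induction l generalizing one two sol with
  | nil => simp [lbBuild]
  | cons x l ih =>
      simp only [List.foldl_cons, List.length_cons, ih, lbBuild]
      refine Prod.ext ?_ (Prod.ext ?_ ?_)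
      · push_cast; ring
      · show two * 2 * 2 ^ l.length = two * 2 ^ (l.length + 1); ring
      · simp

theorem lbBuild_getElem? (k : Nat) (i : Nat) (hi : i < 2 * k) (one two : Int) :
    (lbBuild one two k)[i]? =
      some (if i % 2 = 0 then one + 1 + (i / 2 : Nat) else two * 2 ^ ((i + 1) / 2)) := by
  induction k generalizing i one two with
  | zero => omega
  | succ k ih =>
      match i with
      | 0 => simp [lbBuild]
      | 1 => simp [lbBuild]
      | (j + 2) =>
          have hj : j < 2 * k := by omega
          have : (lbBuild one two (k + 1))[j + 2]? = (lbBuild (one + 1) (two * 2) k)[j]? := by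
            simp [lbBuild]
          rw [this, ih j hj]
          congr 1
          by_cases hp : j % 2 = 0
          · have h2 : (j + 2) % 2 = 0 := by omega
            have h3 : (j + 2) / 2 = j / 2 + 1 := by omega
            simp [hp, h2, h3]; ring
          · have h2 : ¬ (j + 2) % 2 = 0 := by omega
            have h3 : (j + 2 + 1) / 2 = (j + 1) / 2 + 1 := by omega
            simp [hp, h3]; ring

theorem little_big_spec' (n : Int) (hn : 1 ≤ n) : little_big n = little_big_alt n := by
  unfold little_big
  rw [lb_fold]
  have hlen : (PySem.List.pyRange 0 (n + 1) 1).length = (n + 1).toNat := by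
    rw [PySem.List.length_pyRange_one]; congr 1; omega
  set K := (n + 1).toNat with hK
  rw [hlen]
  set L := ([5, 100] ++ lbBuild 5 100 K : List Int) with hL
  show PySem.List.pyGetD L (n - 1) 0 = little_big_alt n
  have hLlen : L.length = 2 + 2 * K := by simp [hL, lbBuild_length]; omega
  have hlt : n - 1 < (L.length : Int) := by rw [hLlen]; push_cast; omega
  rw [PySem.List.pyGetD_eq_getElem L 0 (by omega) hlt]
  set m := (n - 1).toNat with hm
  have hmn : (m : Int) = n - 1 := by omega
  -- compute A's value L[m]
  have hmL : m < L.length := by omega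
  have hA : L[m] = if m % 2 = 0 then 5 + ((m / 2 : Nat) : Int) else 100 * 2 ^ ((m + 1) / 2 - 1) := by
    match hm2 : m, hmL with
    | 0, _ => simp [hL]
    | 1, _ => simp [hL]
    | (j + 2), hmL' =>
        have hj : j < 2 * K := by rw [hLlen] at hmL'; omega
        have hgs : L[j+2]? = (lbBuild 5 100 K)[j]? := by simp [hL]
        have := lbBuild_getElem? K j hj 5 100
        rw [hgs.symm, List.getElem?_eq_getElem hmL'] at this
        have hval := Option.some.inj this
        rw [hval]
        by_cases hp : j % 2 = 0
        · have h2 : (j + 2) % 2 = 0 := by omega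
          have h3 : (j + 2) / 2 = j / 2 + 1 := by omega
          simp [hp, h2, h3]; ring
        · have h2 : ¬ (j + 2) % 2 = 0 := by omega
          have h3 : (j + 2 + 1) / 2 - 1 = (j + 1) / 2 := by omega
          simp [hp, h3]
  rw [hA]
  -- compare with B
  unfold little_big_alt
  rw [PySem.Int.mod_eq_emod_of_pos (a := n) (by omega : (0:Int) < 2),
      PySem.Int.floordiv_eq_ediv_of_pos (a := n - 1) (by omega : (0:Int) < 2),
      PySem.Int.floordiv_eq_ediv_of_pos (a := n) (by omega : (0:Int) < 2)]
  by_cases hp : m % 2 = 0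
  · -- n odd
    have hne : ¬ n % 2 = 0 := by omega
    simp only [hp, if_true]
    have : ((m / 2 : Nat) : Int) = (n - 1) / 2 := by omega
    simp [hne, this]
  · -- n even
    have heq : n % 2 = 0 := by omega
    have hexp : (m + 1) / 2 - 1 = (n / 2 - 1).toNat := by omega
    simp [hp, heq, hexp]

-- ===== VERDICT (by name: the statement is the Claim_ definition above) =====
theorem little_big_spec : Claim_equal_little_big := by
  intro n _ hpre
  unfold Spec_little_big
  exact little_big_spec' n hpre
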